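-- pv_equiv track=rewrite | github.com/nileshmantati/Django-Travelwebsite | bus_app/views.py | generate_seats_for_sleeper
-- ===== SOURCE A (Python) =====
-- def generate_seats_for_sleeper(seat_type="L",total_seats=50):
--     columns = []
--     seats_per_column = 3
--     seat_no = 1
--
--     while seat_no <= total_seats:
--         col = []
--         for _ in range(seats_per_column):
--             if seat_no <= total_seats:
--                 col.append(f"{seat_type}{seat_no}")
--                 seat_no += 1
--         columns.append(col[::-1])
--
--     return columns
-- ===== SOURCE B (Python) =====
-- def generate_seats_for_sleeper(seat_type="L", total_seats=50):
--     # Pass 1: build the flat list of all seat labels in order.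
--     flat = [f"{seat_type}{i}" for i in range(1, total_seats + 1)]
--     # Pass 2: partition it into columns of 3, each reversed.
--     columns = []
--     i = 0
--     while i < len(flat):
--         columns.append(flat[i:i+3][::-1])
--         i += 3
--     return columns
-- ===== Notes on version B (the rewrite author's own statement) =====
-- stated objective: simpler
-- what changed: Replaces the counter-threaded while/for loop (a shared seat_no counter mutated inside a nested conditional for-loop) with a two-stage build-then-partition: first build the flat label list with one comprehension, then slice off reversed groups of three.
import Mathlib
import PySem

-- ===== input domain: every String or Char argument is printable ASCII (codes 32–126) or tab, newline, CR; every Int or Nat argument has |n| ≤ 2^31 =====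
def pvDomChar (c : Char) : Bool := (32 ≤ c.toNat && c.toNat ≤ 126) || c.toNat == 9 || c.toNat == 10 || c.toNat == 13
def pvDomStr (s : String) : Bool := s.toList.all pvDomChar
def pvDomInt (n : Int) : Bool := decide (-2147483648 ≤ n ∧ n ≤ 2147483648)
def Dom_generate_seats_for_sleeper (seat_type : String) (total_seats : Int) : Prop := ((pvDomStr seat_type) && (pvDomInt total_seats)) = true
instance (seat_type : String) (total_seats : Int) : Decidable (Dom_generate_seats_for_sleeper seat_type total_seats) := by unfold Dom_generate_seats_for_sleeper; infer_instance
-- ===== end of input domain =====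

-- B replaces A's counter-threaded while/for pass with a two-stage build-then-partition
-- (flat label list, then reversed chunks of 3); objective: simpler.


-- ===== PORT A =====
-- inner 'for _ in range(seats_per_column)': threads (col, seat_no) through 3 iterations
def pvAInner (seat_type : String) (total_seats : Int) : Nat → Int → List String → List String × Int
  | 0, seat_no, col => (col, seat_no)
  | k+1, seat_no, col =>
    if seat_no ≤ total_seats then
      pvAInner seat_type total_seats k (seat_no + 1) (col ++ [seat_type ++ PySem.Int.toStr seat_no])
    else
      pvAInner seat_type total_seats k seat_no col

-- needed only for the while-loop's termination
theorem pvAInner_snd_ge (seat_type : String) (total_seats : Int) :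
    ∀ (k : Nat) (seat_no : Int) (col : List String),
      seat_no ≤ (pvAInner seat_type total_seats k seat_no col).2 := by
  intro k
  induction k with
  | zero => intro sn col; simp [pvAInner]
  | succ k ih =>
    intro sn col
    simp only [pvAInner]
    split
    · exact le_trans (by omega) (ih (sn + 1) _)
    · exact ih sn col

-- the outer 'while seat_no <= total_seats' loop
def pvALoop (seat_type : String) (total_seats : Int) (seat_no : Int) : List (List String) :=
  if h : seat_no ≤ total_seats then -- while condition
    let r := pvAInner seat_type total_seats 3 seat_no []
    r.1.reverse :: pvALoop seat_type total_seats r.2   -- col[::-1] then continue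
  else []
termination_by (total_seats + 1 - seat_no).toNat
decreasing_by
  have h1 : seat_no + 1 ≤ (pvAInner seat_type total_seats 3 seat_no []).2 := by
    simp only [pvAInner, if_pos h]
    exact pvAInner_snd_ge seat_type total_seats 2 (seat_no + 1) _
  omega

def generate_seats_for_sleeper (seat_type : String) (total_seats : Int) : List (List String) :=
  pvALoop seat_type total_seats 1

-- ===== PORT B =====
-- flat = [f"{seat_type}{i}" for i in range(1, total_seats + 1)]
def pvFlat (seat_type : String) (total_seats : Int) : List String :=
  (PySem.List.pyRange 1 (total_seats + 1) 1).map (fun i => seat_type ++ PySem.Int.toStr i)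

-- 'i = 0; while i < len(flat): columns.append(flat[i:i+3][::-1]); i += 3'
-- (flat[i:i+3] ported with PySem.List.slice; [::-1] = reverse by PySem.List.slice?_none_none_neg_one)
def pvBLoop (flat : List String) (i : Int) : List (List String) :=
  if i < (flat.length : Int) then
    (PySem.List.slice flat (some i) (some (i + 3))).reverse :: pvBLoop flat (i + 3)
  else []
termination_by ((flat.length : Int) - i).toNat
decreasing_by omega

def generate_seats_for_sleeper_alt (seat_type : String) (total_seats : Int) : List (List String) :=
  pvBLoop (pvFlat seat_type total_seats) 0

-- ===== PRECONDITION & SPEC =====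
def Spec_generate_seats_for_sleeper (seat_type : String) (total_seats : Int) (out : List (List String)) : Prop := out = generate_seats_for_sleeper_alt seat_type total_seats
instance (seat_type : String) (total_seats : Int) (out : List (List String)) : Decidable (Spec_generate_seats_for_sleeper seat_type total_seats out) := by unfold Spec_generate_seats_for_sleeper; infer_instance

-- ===== CLAIM (what is proved, stated in full; the proofs are below) =====
def Claim_equal_generate_seats_for_sleeper : Prop := ∀ (seat_type : String) (total_seats : Int), Dom_generate_seats_for_sleeper seat_type total_seats → Spec_generate_seats_for_sleeper seat_type total_seats (generate_seats_for_sleeper seat_type total_seats)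

-- ===== LEMMAS AND PROOFS =====

-- proof-only helper: the drop-3 chunk recursion both ports are related to
def pvBChunk (flat : List String) : List (List String) :=
  if flat = [] then [] else (flat.take 3).reverse :: pvBChunk (flat.drop 3)
termination_by flat.length
decreasing_by
  rename_i h
  have : 0 < flat.length := List.length_pos_iff.mpr h
  simp only [List.length_drop]; omega

theorem pvBLoop_eq_chunk (flat : List String) :
    ∀ (n : Nat) (i : Int), 0 ≤ i → ((flat.length : Int) - i).toNat ≤ n →
      pvBLoop flat i = pvBChunk (flat.drop i.toNat) := by
  intro n
  induction n with
  | zero =>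
    intro i h0 hn
    rw [pvBLoop, if_neg (by omega), List.drop_eq_nil_of_le (by omega), pvBChunk]
    simp
  | succ n ih =>
    intro i h0 hn
    by_cases hi : i < (flat.length : Int)
    · have hle : ((flat.length : Int) - (i + 3)).toNat ≤ n := by omega
      have hne : List.drop i.toNat flat ≠ [] := by
        simp only [ne_eq, List.drop_eq_nil_iff]
        omega
      rw [pvBLoop, if_pos hi, PySem.List.slice_toNat flat h0 (by omega),
        ih (i + 3) (by omega) hle]
      conv_rhs => rw [pvBChunk, if_neg hne]
      have h3 : (i + 3).toNat - i.toNat = 3 := by omega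
      have h3' : (i + 3).toNat = i.toNat + 3 := by omega
      rw [h3, h3', List.drop_drop]
    · rw [pvBLoop, if_neg hi, List.drop_eq_nil_of_le (by omega), pvBChunk]
      simp

theorem pvKey (st : String) (t : Int) :
    ∀ (n : Nat) (sn : Int), (t + 1 - sn).toNat ≤ n →
      pvALoop st t sn
        = pvBChunk ((PySem.List.pyRange sn (t + 1) 1).map (fun i => st ++ PySem.Int.toStr i)) := by
  intro n
  induction n with
  | zero =>
    intro sn h
    have hgt : t < sn := by omega
    rw [pvALoop, PySem.List.pyRange_one_eq_nil (by omega)]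
    simp [hgt, pvBChunk]
  | succ n ih =>
    intro sn h
    by_cases hle : sn ≤ t
    · rw [pvALoop]
      simp only [dif_pos hle]
      by_cases h2 : sn + 1 + 1 ≤ t
      · -- full column of 3
        have e : pvAInner st t 3 sn [] = ([st ++ PySem.Int.toStr sn, st ++ PySem.Int.toStr (sn+1), st ++ PySem.Int.toStr (sn+1+1)], sn+1+1+1) := by
          simp only [pvAInner, if_pos hle, if_pos (show sn + 1 ≤ t by omega), if_pos h2]
          simp
        rw [e, PySem.List.pyRange_one_cons (by omega), PySem.List.pyRange_one_cons (by omega),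
          PySem.List.pyRange_one_cons (by omega)]
        simp only [List.map_cons]
        rw [pvBChunk, if_neg (by simp), ih (sn+1+1+1) (by omega)]
        simp
      · by_cases h1 : sn + 1 ≤ t
        · -- column of 2, loop ends after
          have e : pvAInner st t 3 sn [] = ([st ++ PySem.Int.toStr sn, st ++ PySem.Int.toStr (sn+1)], sn+1+1) := by
            simp only [pvAInner, if_pos hle, if_pos h1, if_neg h2]
            simp
          rw [e, PySem.List.pyRange_one_cons (by omega), PySem.List.pyRange_one_cons (by omega),
            PySem.List.pyRange_one_eq_nil (by omega)]
          simp only [List.map_cons, List.map_nil]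
          rw [pvBChunk, if_neg (by simp), pvALoop]
          simp [h2, pvBChunk]
        · -- column of 1, loop ends after
          have e : pvAInner st t 3 sn [] = ([st ++ PySem.Int.toStr sn], sn+1) := by
            simp only [pvAInner, if_pos hle, if_neg h1]
            simp
          rw [e, PySem.List.pyRange_one_cons (by omega),
            PySem.List.pyRange_one_eq_nil (by omega)]
          simp only [List.map_cons, List.map_nil]
          rw [pvBChunk, if_neg (by simp), pvALoop]
          simp [h1, pvBChunk]
    · rw [pvALoop, PySem.List.pyRange_one_eq_nil (by omega)]
      simp [hle, pvBChunk]

-- ===== VERDICT (by name: the statement is the Claim_ definition above) =====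
theorem generate_seats_for_sleeper_spec : Claim_equal_generate_seats_for_sleeper := by
  intro st t _
  unfold Spec_generate_seats_for_sleeper generate_seats_for_sleeper generate_seats_for_sleeper_alt
  rw [pvBLoop_eq_chunk (pvFlat st t) ((pvFlat st t).length : Nat) 0 le_rfl (by omega)]
  simp only [Int.toNat_zero, List.drop_zero]
  exact pvKey st t (t + 1 - 1).toNat 1 (by omega)
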